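-- pv_equiv track=rewrite | github.com/elliewix/IS205-Summer2023 | week 4/loops.py | check_y
-- ===== SOURCE A (Python) =====
-- def check_y(word):
--     # return True only if: no vowels plus yes y
--     # you: False, my: True
--     word = word.lower()
--     vowels = "aeiou"
--     sometimes = "y"
--
--     result = False
--     for v in vowels:
--         if v in word:
--             result = True
--
--     if (result == False) and (sometimes in word):
--         final_result = True
--     else:
--         final_result = False
--
--     return final_result
-- ===== SOURCE B (Python) =====
-- def check_y(word):
--     has_vowel = False
--     has_y = False
--     for ch in word.lower():
--         if ch in "aeiou":
--             has_vowel = True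
--         if ch == "y":
--             has_y = True
--     return has_y and not has_vowel
-- ===== Notes on version B (the rewrite author's own statement) =====
-- stated objective: simpler
-- what changed: B makes one pass over the word's characters maintaining has_vowel/has_y flags, instead of A's loop over the vowel alphabet running a substring search over the word for each vowel.
import Mathlib
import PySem

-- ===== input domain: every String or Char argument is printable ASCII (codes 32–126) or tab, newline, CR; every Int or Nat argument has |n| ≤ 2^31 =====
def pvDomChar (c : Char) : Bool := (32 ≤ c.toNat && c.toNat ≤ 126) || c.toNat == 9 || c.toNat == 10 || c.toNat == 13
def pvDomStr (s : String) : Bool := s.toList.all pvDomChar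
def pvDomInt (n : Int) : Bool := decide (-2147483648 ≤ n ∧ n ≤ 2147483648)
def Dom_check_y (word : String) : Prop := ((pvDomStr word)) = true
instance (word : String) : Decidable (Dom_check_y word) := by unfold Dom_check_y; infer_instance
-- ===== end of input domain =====

-- B replaces A's loop over the vowel alphabet (one substring search per vowel) by a single
-- pass over the word's characters maintaining two flags; objective: simpler.

-- ===== PORT A =====
def check_y (word : String) : Bool :=
  let w := PySem.Str.lower word
  let vowels := "aeiou"
  let sometimes := "y"
  let result := vowels.toList.foldl
    (fun result v => if PySem.Str.isIn (String.ofList [v]) w then true else result) false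
  if result = false ∧ PySem.Str.isIn sometimes w then true else false

-- ===== PORT B =====
def check_y_alt (word : String) : Bool :=
  let st := (PySem.Str.lower word).toList.foldl
    (fun (st : Bool × Bool) ch =>
      let st := if PySem.Chars.isIn [ch] "aeiou".toList then (true, st.2) else st
      if ch == 'y' then (st.1, true) else st)
    (false, false)
  st.2 && !st.1

-- ===== PRECONDITION & SPEC =====
def Spec_check_y (word : String) (out : Bool) : Prop := out = check_y_alt word
instance (word : String) (out : Bool) : Decidable (Spec_check_y word out) := by unfold Spec_check_y; infer_instance

-- ===== CLAIM (what is proved, stated in full; the proofs are below) =====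
def Claim_equal_check_y : Prop := ∀ (word : String), Dom_check_y word → Spec_check_y word (check_y word)

-- ===== LEMMAS AND PROOFS =====

theorem pv_isIn_singleton (c : Char) (l : List Char) :
    PySem.Chars.isIn [c] l = l.contains c := by
  by_cases h : c ∈ l
  · rw [(PySem.Chars.isIn_iff_infix _ _).mpr, List.contains_iff_mem.mpr h]
    rcases List.mem_iff_append.mp h with ⟨s, t, rfl⟩
    exact ⟨s, t, by simp⟩
  · have hf : PySem.Chars.isIn [c] l = false :=
      (PySem.Chars.isIn_eq_false_iff _ _).mpr (fun hinf => h (hinf.mem (by simp)))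
    simp [hf, h]

theorem pv_flags (l : List Char) (a b : Bool) :
    l.foldl (fun (st : Bool × Bool) ch =>
      let st := if PySem.Chars.isIn [ch] "aeiou".toList then (true, st.2) else st
      if ch == 'y' then (st.1, true) else st) (a, b)
    = (a || l.any (fun ch => PySem.Chars.isIn [ch] "aeiou".toList),
       b || l.any (fun ch => ch == 'y')) := by
  induction l generalizing a b with
  | nil => simp
  | cons c l ih =>
    simp only [List.foldl_cons, List.any_cons]
    by_cases hv : PySem.Chars.isIn [c] "aeiou".toList <;> by_cases hy : c == 'y' <;>
      simp only [hv, hy, if_true, Bool.false_or, Bool.true_or, ih] <;> simp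

theorem pv_any_vowel (l : List Char) :
    l.any (fun ch => PySem.Chars.isIn [ch] "aeiou".toList)
      = (l.contains 'a' || l.contains 'e' || l.contains 'i' || l.contains 'o' || l.contains 'u') := by
  have hv : "aeiou".toList = ['a', 'e', 'i', 'o', 'u'] := by decide
  simp only [hv, pv_isIn_singleton]
  rw [Bool.eq_iff_iff]
  simp only [Bool.or_eq_true, List.contains_iff_mem, List.any_eq_true,
    List.mem_cons, List.not_mem_nil, or_false]
  constructor
  · rintro ⟨c, hc, rfl | rfl | rfl | rfl | rfl⟩ <;> tauto
  · rintro ((((h | h) | h) | h) | h) <;> exact ⟨_, h, by simp⟩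

theorem pv_any_y (l : List Char) :
    l.any (fun ch => ch == 'y') = l.contains 'y' := by
  rw [Bool.eq_iff_iff]
  simp [List.any_eq_true]

-- ===== VERDICT (by name: the statement is the Claim_ definition above) =====
theorem check_y_spec : Claim_equal_check_y := by
  intro word _
  show check_y word = check_y_alt word
  unfold check_y check_y_alt
  rw [pv_flags, pv_any_vowel, pv_any_y]
  have hy : "y".toList = ['y'] := by decide
  have hv : "aeiou".toList = ['a', 'e', 'i', 'o', 'u'] := by decide
  simp only [PySem.Str.isIn, PySem.Str.toList_lower, String.toList_ofList, hy, hv,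
    List.foldl_cons, List.foldl_nil, pv_isIn_singleton, Bool.false_or]
  generalize (PySem.Chars.lower word.toList).contains 'a' = v1
  generalize (PySem.Chars.lower word.toList).contains 'e' = v2
  generalize (PySem.Chars.lower word.toList).contains 'i' = v3
  generalize (PySem.Chars.lower word.toList).contains 'o' = v4
  generalize (PySem.Chars.lower word.toList).contains 'u' = v5
  generalize (PySem.Chars.lower word.toList).contains 'y' = v6
  revert v1 v2 v3 v4 v5 v6
  decide
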